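-- pv_equiv track=rewrite | github.com/tkim1205/Lyricaster | src/song_order.py | create_interleaved_order
-- ===== SOURCE A (Python) =====
-- from typing import List, Dict, Tuple
--
-- def create_interleaved_order(sections: Dict[str, str]) -> List[str]:
--     """
--     Create an interleaved order (V1, C, V2, C, etc.).
--     Use this if you want verses alternated with choruses.
--     """
--     verses = sorted([k for k in sections if k.startswith('V') and k != 'Va'])
--     choruses = [k for k in sections if k == 'C']
--     bridges = [k for k in sections if k.startswith('B')]
--     vamps = [k for k in sections if k == 'Va']
--     others = [k for k in sections if k not in verses + choruses + bridges + vamps]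
--
--     order = []
--
--     # Interleave verses and choruses
--     for i, verse in enumerate(verses):
--         order.append(verse)
--         if choruses:
--             order.append('C')
--
--     # Add remaining sections
--     order.extend(bridges)
--     order.extend(vamps)
--     order.extend(others)
--
--     return order
-- ===== SOURCE B (Python) =====
-- def _sort_key(k):
--     """Schwartzian rank: verses sorted among themselves, then bridges, vamps, others."""
--     if k.startswith('V') and k != 'Va':
--         return '0' + k
--     if k.startswith('B'):
--         return '2'
--     if k == 'Va':
--         return '3'
--     return '4'
--
-- def create_interleaved_order(sections):
--     """One global stable sort of the non-chorus keys by a rank key, then a single output pass."""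
--     keys = list(sections)
--     has_chorus = 'C' in keys
--     order = []
--     for k in sorted((k for k in keys if k != 'C'), key=_sort_key):
--         order.append(k)
--         if has_chorus and k.startswith('V') and k != 'Va':
--             order.append('C')
--     return order
-- ===== Notes on version B (the rewrite author's own statement) =====
-- stated objective: alternative
-- what changed: Replaces A's five bucket comprehensions, quadratic concatenated-membership test and bucket-by-bucket assembly with a decorate-and-sort scheme: one stable sort of the non-chorus keys under a composite rank key ('0'+k for verses, '2' bridges, '3' vamps, '4' others) followed by a single output pass that splices 'C' after each verse.
import Mathlib
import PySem

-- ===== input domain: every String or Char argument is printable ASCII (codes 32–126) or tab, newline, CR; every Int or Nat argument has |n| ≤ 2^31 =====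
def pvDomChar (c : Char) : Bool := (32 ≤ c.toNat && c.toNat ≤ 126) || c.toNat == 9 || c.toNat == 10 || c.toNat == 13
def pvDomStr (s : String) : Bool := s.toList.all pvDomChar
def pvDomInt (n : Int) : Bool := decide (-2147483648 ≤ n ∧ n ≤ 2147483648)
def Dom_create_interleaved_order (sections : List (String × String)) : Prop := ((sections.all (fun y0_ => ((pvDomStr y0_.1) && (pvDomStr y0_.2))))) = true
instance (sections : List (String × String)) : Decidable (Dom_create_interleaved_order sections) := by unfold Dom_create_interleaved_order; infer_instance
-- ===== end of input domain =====

-- B replaces A's five bucket comprehensions plus a concatenated-membership scan by a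
-- decorate-and-sort: ONE stable sort of the non-chorus keys under a composite rank key,
-- then a single output pass splicing in 'C' after each verse (alternative decomposition).
-- Neither program mutates its argument; the equivalence is about the return value.

-- ===== PORT A =====
def create_interleaved_order (sections : List (String × String)) : List String :=
  let keys := sections.map Prod.fst
  let verses := PySem.List.sorted
    (keys.filter (fun k => PySem.Str.startswith k "V" && k != "Va")) (fun x => x) false
  let choruses := keys.filter (fun k => k == "C")
  let bridges := keys.filter (fun k => PySem.Str.startswith k "B")
  let vamps := keys.filter (fun k => k == "Va")
  let others := keys.filter (fun k => !((verses ++ choruses ++ bridges ++ vamps).contains k))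
  let order : List String := []
  -- for verse in verses: order.append(verse); if choruses: order.append('C')
  let order := verses.foldl (fun order verse =>
    let order := order ++ [verse]
    if choruses.isEmpty then order else order ++ ["C"]) order
  ((order ++ bridges) ++ vamps) ++ others

-- ===== PORT B =====
-- the rank key of Source B's _sort_key: verses keep their own alphabetical order, then
-- bridges, vamps, others in stable (original) order
def pvSortKey (k : String) : String :=
  if PySem.Str.startswith k "V" && k != "Va" then "0" ++ k
  else if PySem.Str.startswith k "B" then "2"
  else if k == "Va" then "3"
  else "4"

def create_interleaved_order_alt (sections : List (String × String)) : List String :=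
  let keys := sections.map Prod.fst
  let has_chorus := keys.contains "C"
  let order : List String := []
  let order := (PySem.List.sorted (keys.filter (fun k => k != "C")) pvSortKey false).foldl
    (fun order k =>
      let order := order ++ [k]
      if has_chorus && (PySem.Str.startswith k "V" && k != "Va") then order ++ ["C"]
      else order) order
  order

-- ===== PRECONDITION & SPEC =====
def Spec_create_interleaved_order (sections : List (String × String)) (out : List String) : Prop := out = create_interleaved_order_alt sections
instance (sections : List (String × String)) (out : List String) : Decidable (Spec_create_interleaved_order sections out) := by unfold Spec_create_interleaved_order; infer_instance

-- ===== CLAIM (what is proved, stated in full; the proofs are below) =====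
def Claim_equal_create_interleaved_order : Prop := ∀ (sections : List (String × String)), Dom_create_interleaved_order sections → Spec_create_interleaved_order sections (create_interleaved_order sections)

-- ===== LEMMAS AND PROOFS =====

-- the five disjoint categories, in A's classification order
def pvQ1 (k : String) : Bool := PySem.Str.startswith k "V" && k != "Va"
def pvQ3 (k : String) : Bool := !pvQ1 k && !(k == "C") && PySem.Str.startswith k "B"
def pvQ4 (k : String) : Bool :=
  !pvQ1 k && !(k == "C") && !(PySem.Str.startswith k "B") && k == "Va"
def pvQ5 (k : String) : Bool :=
  !pvQ1 k && !(k == "C") && !(PySem.Str.startswith k "B") && !(k == "Va")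

-- insertBy unfolding equations
theorem pvInsert_nil {α : Type} (bf : α → α → Bool) (x : α) :
    PySem.List.insertBy bf x [] = [x] := by simp [PySem.List.insertBy]

theorem pvInsert_cons {α : Type} (bf : α → α → Bool) (x y : α) (ys : List α) :
    PySem.List.insertBy bf x (y :: ys) =
      if bf x y then x :: y :: ys else y :: PySem.List.insertBy bf x ys := by
  simp [PySem.List.insertBy]

theorem pvInsert_all_true {α : Type} (bf : α → α → Bool) (x : α) (zs : List α)
    (h : ∀ z ∈ zs, bf x z = true) : PySem.List.insertBy bf x zs = x :: zs := by
  cases zs with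
  | nil => simp [pvInsert_nil]
  | cons z zs => rw [pvInsert_cons, h z (List.mem_cons_self)]; simp

theorem pvInsert_all_false {α : Type} (bf : α → α → Bool) (x : α) (ys : List α)
    (h : ∀ y ∈ ys, bf x y = false) : PySem.List.insertBy bf x ys = ys ++ [x] := by
  induction ys with
  | nil => simp [pvInsert_nil]
  | cons y ys ih =>
    rw [pvInsert_cons, h y (List.mem_cons_self)]
    simp [ih (fun z hz => h z (List.mem_cons_of_mem _ hz))]

theorem pvInsert_append_all_true {α : Type} (bf : α → α → Bool) (x : α) (ys zs : List α)
    (h : ∀ z ∈ zs, bf x z = true) :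
    PySem.List.insertBy bf x (ys ++ zs) = PySem.List.insertBy bf x ys ++ zs := by
  induction ys with
  | nil => simp [pvInsert_nil, pvInsert_all_true bf x zs h]
  | cons y ys ih =>
    rw [List.cons_append, pvInsert_cons, pvInsert_cons]
    by_cases hb : bf x y = true
    · simp [hb]
    · simp only [Bool.not_eq_true] at hb
      simp [hb, ih]

theorem pvInsert_append_all_false {α : Type} (bf : α → α → Bool) (x : α) (ys zs : List α)
    (h : ∀ y ∈ ys, bf x y = false) :
    PySem.List.insertBy bf x (ys ++ zs) = ys ++ PySem.List.insertBy bf x zs := by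
  induction ys with
  | nil => rfl
  | cons y ys ih =>
    rw [List.cons_append, pvInsert_cons, h y (List.mem_cons_self)]
    simp [ih (fun z hz => h z (List.mem_cons_of_mem _ hz))]

theorem pvInsert_congr {α : Type} (b1 b2 : α → α → Bool) (x : α) (ys : List α)
    (h : ∀ y ∈ ys, b1 x y = b2 x y) :
    PySem.List.insertBy b1 x ys = PySem.List.insertBy b2 x ys := by
  induction ys with
  | nil => simp [pvInsert_nil]
  | cons y ys ih =>
    rw [pvInsert_cons, pvInsert_cons, h y (List.mem_cons_self),
      ih (fun z hz => h z (List.mem_cons_of_mem _ hz))]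

-- sorted of a snoc is an insertion into the sorted prefix
theorem pvSorted_snoc {α κ : Type} [LT κ] [DecidableLT κ] (l : List α) (x : α) (key : α → κ) :
    PySem.List.sorted (l ++ [x]) key false =
      PySem.List.insertBy (fun a b => decide (key a < key b)) x
        (PySem.List.sorted l key false) := by
  rw [PySem.List.sorted_eq_foldl_insertBy, PySem.List.sorted_eq_foldl_insertBy,
    List.foldl_append]
  rfl

-- string-order facts about the rank keys
theorem pvLt02 (s : String) : ("0" ++ s) < "2" := by
  rw [String.lt_iff_toList_lt]
  simp only [String.toList_append]
  exact List.Lex.rel (by decide)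

theorem pvLt03 (s : String) : ("0" ++ s) < "3" := by
  rw [String.lt_iff_toList_lt]
  simp only [String.toList_append]
  exact List.Lex.rel (by decide)

theorem pvLt04 (s : String) : ("0" ++ s) < "4" := by
  rw [String.lt_iff_toList_lt]
  simp only [String.toList_append]
  exact List.Lex.rel (by decide)

theorem pvLt23 : ("2" : String) < "3" := by
  rw [String.lt_iff_toList_lt]; exact List.Lex.rel (by decide)

theorem pvLt24 : ("2" : String) < "4" := by
  rw [String.lt_iff_toList_lt]; exact List.Lex.rel (by decide)

theorem pvLt34 : ("3" : String) < "4" := by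
  rw [String.lt_iff_toList_lt]; exact List.Lex.rel (by decide)

theorem pvLt00 (a b : String) : ("0" ++ a) < ("0" ++ b) ↔ a < b := by
  rw [String.lt_iff_toList_lt, String.lt_iff_toList_lt]; simp

-- the rank key on each category
theorem pvKey_q1 (k : String) (h : pvQ1 k = true) : pvSortKey k = "0" ++ k := by
  unfold pvQ1 at h; unfold pvSortKey; rw [if_pos h]

theorem pvKey_q3 (k : String) (h : pvQ3 k = true) : pvSortKey k = "2" := by
  unfold pvQ3 at h
  simp only [Bool.and_eq_true, Bool.not_eq_true'] at h
  have h1 : (PySem.Str.startswith k "V" && k != "Va") = false := h.1.1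
  unfold pvSortKey
  rw [if_neg (by rw [h1]; simp), if_pos h.2]

theorem pvKey_q4 (k : String) (h : pvQ4 k = true) : pvSortKey k = "3" := by
  unfold pvQ4 at h
  simp only [Bool.and_eq_true, Bool.not_eq_true'] at h
  have h1 : (PySem.Str.startswith k "V" && k != "Va") = false := h.1.1.1
  unfold pvSortKey
  rw [if_neg (by rw [h1]; simp), if_neg (by rw [h.1.2]; simp), if_pos h.2]

theorem pvKey_q5 (k : String) (h : pvQ5 k = true) : pvSortKey k = "4" := by
  unfold pvQ5 at h
  simp only [Bool.and_eq_true, Bool.not_eq_true'] at h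
  have h1 : (PySem.Str.startswith k "V" && k != "Va") = false := h.1.1.1
  unfold pvSortKey
  rw [if_neg (by rw [h1]; simp), if_neg (by rw [h.1.2]; simp), if_neg (by rw [h.2]; simp)]

-- the main decomposition: the stable sort under the rank key lists the sorted verses,
-- then the bridges, vamps and others in original order
theorem pvDecomp (keys : List String) :
    PySem.List.sorted (keys.filter (fun k => k != "C")) pvSortKey false =
      PySem.List.sorted (keys.filter pvQ1) (fun x => x) false ++
        (keys.filter pvQ3 ++ (keys.filter pvQ4 ++ keys.filter pvQ5)) := by
  induction keys using List.reverseRecOn with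
  | nil => rfl
  | append_singleton xs x ih =>
    by_cases hC : x = "C"
    · subst hC
      have e1 : pvQ1 "C" = false := by decide
      have e3 : pvQ3 "C" = false := by decide
      have e4 : pvQ4 "C" = false := by decide
      have e5 : pvQ5 "C" = false := by decide
      simp [List.filter_append, e1, e3, e4, e5, ih]
    · have hCne : (x != "C") = true := by simp [hC]
      by_cases hq1 : pvQ1 x = true
      · -- x is a verse: insert into the sorted-verses prefix
        have e3 : pvQ3 x = false := by simp [pvQ3, hq1]
        have e4 : pvQ4 x = false := by simp [pvQ4, hq1]
        have e5 : pvQ5 x = false := by simp [pvQ5, hq1]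
        simp only [List.filter_append, List.filter_cons, List.filter_nil, hCne,
          hq1, e3, e4, e5, if_true, if_false, Bool.false_eq_true, List.append_nil]
        rw [pvSorted_snoc, ih]
        rw [pvInsert_append_all_true _ x _ _ (by
          intro z hz
          rcases List.mem_append.mp hz with h3 | h45
          · rw [pvKey_q1 x hq1, pvKey_q3 z (List.mem_filter.mp h3).2]
            exact decide_eq_true (pvLt02 x)
          · rcases List.mem_append.mp h45 with h4 | h5
            · rw [pvKey_q1 x hq1, pvKey_q4 z (List.mem_filter.mp h4).2]
              exact decide_eq_true (pvLt03 x)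
            · rw [pvKey_q1 x hq1, pvKey_q5 z (List.mem_filter.mp h5).2]
              exact decide_eq_true (pvLt04 x))]
        rw [pvInsert_congr _ (fun a b => decide (a < b)) x _ (by
          intro y hy
          have hy1 : pvQ1 y = true :=
            (List.mem_filter.mp ((PySem.List.mem_sorted _ _ _ y).mp hy)).2
          rw [pvKey_q1 x hq1, pvKey_q1 y hy1]
          exact decide_eq_decide.mpr (pvLt00 x y))]
        rw [← pvSorted_snoc]
      · -- x is a bridge, vamp or other: it lands at the end of its block
        have hq1' : pvQ1 x = false := by simpa using hq1
        simp only [List.filter_append, List.filter_cons, List.filter_nil, hCne,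
          hq1', if_true, Bool.false_eq_true, if_false, List.append_nil]
        rw [pvSorted_snoc, ih]
        by_cases hB : PySem.Str.startswith x "B" = true
        · -- bridge
          have hBc : PySem.Chars.startswith x.toList ['B'] = true := by simpa using hB
          have e3 : pvQ3 x = true := by simp [pvQ3, hq1', hC, hBc]
          have e4 : pvQ4 x = false := by simp [pvQ4, hBc]
          have e5 : pvQ5 x = false := by simp [pvQ5, hBc]
          simp only [e3, e4, e5, if_true, Bool.false_eq_true, if_false,
            List.append_nil]
          rw [show
            PySem.List.sorted (xs.filter pvQ1) (fun x => x) false ++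
              (xs.filter pvQ3 ++ (xs.filter pvQ4 ++ xs.filter pvQ5)) =
            (PySem.List.sorted (xs.filter pvQ1) (fun x => x) false ++ xs.filter pvQ3) ++
              (xs.filter pvQ4 ++ xs.filter pvQ5) by simp]
          rw [pvInsert_append_all_false _ x _ _ (by
            intro y hy
            rcases List.mem_append.mp hy with hv | h3
            · have hy1 : pvQ1 y = true :=
                (List.mem_filter.mp ((PySem.List.mem_sorted _ _ _ y).mp hv)).2
              rw [pvKey_q3 x e3, pvKey_q1 y hy1]
              exact decide_eq_false (lt_asymm (pvLt02 y))
            · rw [pvKey_q3 x e3, pvKey_q3 y (List.mem_filter.mp h3).2]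
              exact decide_eq_false (lt_irrefl _))]
          rw [pvInsert_all_true _ x _ (by
            intro z hz
            rcases List.mem_append.mp hz with h4 | h5
            · rw [pvKey_q3 x e3, pvKey_q4 z (List.mem_filter.mp h4).2]
              exact decide_eq_true pvLt23
            · rw [pvKey_q3 x e3, pvKey_q5 z (List.mem_filter.mp h5).2]
              exact decide_eq_true pvLt24)]
          simp
        · have hB' : PySem.Chars.startswith x.toList ['B'] = false := by
            simpa using hB
          by_cases hVa : x = "Va"
          · -- vamp
            have e3 : pvQ3 x = false := by simp [pvQ3, hB']
            have e4 : pvQ4 x = true := by rw [hVa]; decide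
            have e5 : pvQ5 x = false := by simp [pvQ5, hVa]
            simp only [e3, e4, e5, if_true, Bool.false_eq_true, if_false,
              List.append_nil]
            rw [show
              PySem.List.sorted (xs.filter pvQ1) (fun x => x) false ++
                (xs.filter pvQ3 ++ (xs.filter pvQ4 ++ xs.filter pvQ5)) =
              ((PySem.List.sorted (xs.filter pvQ1) (fun x => x) false ++ xs.filter pvQ3) ++
                xs.filter pvQ4) ++ xs.filter pvQ5 by simp]
            rw [pvInsert_append_all_false _ x _ _ (by
              intro y hy
              rcases List.mem_append.mp hy with hv3 | h4
              · rcases List.mem_append.mp hv3 with hv | h3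
                · have hy1 : pvQ1 y = true :=
                    (List.mem_filter.mp ((PySem.List.mem_sorted _ _ _ y).mp hv)).2
                  rw [pvKey_q4 x e4, pvKey_q1 y hy1]
                  exact decide_eq_false (lt_asymm (pvLt03 y))
                · rw [pvKey_q4 x e4, pvKey_q3 y (List.mem_filter.mp h3).2]
                  exact decide_eq_false (lt_asymm pvLt23)
              · rw [pvKey_q4 x e4, pvKey_q4 y (List.mem_filter.mp h4).2]
                exact decide_eq_false (lt_irrefl _))]
            rw [pvInsert_all_true _ x _ (by
              intro z hz
              rw [pvKey_q4 x e4, pvKey_q5 z (List.mem_filter.mp hz).2]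
              exact decide_eq_true pvLt34)]
            simp
          · -- other
            have e3 : pvQ3 x = false := by simp [pvQ3, hB']
            have e4 : pvQ4 x = false := by simp [pvQ4, hVa]
            have e5 : pvQ5 x = true := by simp [pvQ5, hq1', hC, hB', hVa]
            simp only [e3, e4, e5, if_true, Bool.false_eq_true, if_false,
              List.append_nil]
            rw [pvInsert_all_false _ x _ (by
              intro y hy
              rcases List.mem_append.mp hy with hv | h345
              · have hy1 : pvQ1 y = true :=
                  (List.mem_filter.mp ((PySem.List.mem_sorted _ _ _ y).mp hv)).2
                rw [pvKey_q5 x e5, pvKey_q1 y hy1]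
                exact decide_eq_false (lt_asymm (pvLt04 y))
              · rcases List.mem_append.mp h345 with h3 | h45
                · rw [pvKey_q5 x e5, pvKey_q3 y (List.mem_filter.mp h3).2]
                  exact decide_eq_false (lt_asymm pvLt24)
                · rcases List.mem_append.mp h45 with h4 | h5
                  · rw [pvKey_q5 x e5, pvKey_q4 y (List.mem_filter.mp h4).2]
                    exact decide_eq_false (lt_asymm pvLt34)
                  · rw [pvKey_q5 x e5, pvKey_q5 y (List.mem_filter.mp h5).2]
                    exact decide_eq_false (lt_irrefl _))]
            simp

-- A's chorus test: 'choruses' is empty iff 'C' is not among the keys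
theorem pvChorus (keys : List String) :
    (keys.filter (fun k => k == "C")).isEmpty = !(keys.contains "C") := by
  induction keys with
  | nil => rfl
  | cons k ks ih =>
    by_cases h : k = "C"
    · subst h; simp
    · simp [h, ih, Ne.symm h]


-- A's later filters coincide with the disjoint categories
theorem pv_sw_B_not_V (k : String) (hb : PySem.Str.startswith k "B" = true) :
    PySem.Str.startswith k "V" = false := by
  cases hvv : PySem.Str.startswith k "V" with
  | false => rfl
  | true =>
    exfalso
    obtain ⟨tb, htb⟩ := (PySem.Chars.startswith_iff _ _).mp (by simpa using hb)
    obtain ⟨tv, htv⟩ := (PySem.Chars.startswith_iff _ _).mp (by simpa using hvv)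
    have h := htb.trans htv.symm
    simp at h

theorem pvQ3_eq (k : String) : pvQ3 k = PySem.Str.startswith k "B" := by
  by_cases hb : PySem.Str.startswith k "B" = true
  · by_cases hc : k = "C"
    · subst hc; exact absurd hb (by decide)
    · by_cases hva : k = "Va"
      · subst hva; exact absurd hb (by decide)
      · have hc' : (k == "C") = false := beq_eq_false_iff_ne.mpr hc
        simp only [pvQ3, pvQ1, pv_sw_B_not_V k hb, Bool.false_and, Bool.not_false,
          hc', Bool.true_and]
  · have hb' : PySem.Str.startswith k "B" = false := by
      cases h : PySem.Str.startswith k "B" <;> simp_all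
    simp only [pvQ3, hb', Bool.and_false]

theorem pvQ4_eq (k : String) : pvQ4 k = (k == "Va") := by
  by_cases h : k = "Va"
  · subst h; decide
  · simp [pvQ4, h]

theorem pvOthers_eq (keys : List String) :
    keys.filter (fun k =>
      !((PySem.List.sorted (keys.filter pvQ1) (fun x => x) false
          ++ keys.filter (fun k => k == "C")
          ++ keys.filter (fun k => PySem.Str.startswith k "B")
          ++ keys.filter (fun k => k == "Va")).contains k))
    = keys.filter pvQ5 := by
  apply List.filter_congr
  intro k hk
  show (!((PySem.List.sorted (keys.filter pvQ1) (fun x => x) false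
          ++ keys.filter (fun k => k == "C")
          ++ keys.filter (fun k => PySem.Str.startswith k "B")
          ++ keys.filter (fun k => k == "Va")).contains k)) = pvQ5 k
  by_cases h1 : pvQ1 k = true
  · have hm : k ∈ PySem.List.sorted (keys.filter pvQ1) (fun x => x) false := by
      rw [PySem.List.mem_sorted, List.mem_filter]; exact ⟨hk, h1⟩
    have hC : ((PySem.List.sorted (keys.filter pvQ1) (fun x => x) false
          ++ keys.filter (fun k => k == "C")
          ++ keys.filter (fun k => PySem.Str.startswith k "B")
          ++ keys.filter (fun k => k == "Va")).contains k) = true := by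
      rw [List.contains_eq_mem, decide_eq_true_eq]
      simp only [List.mem_append]
      exact Or.inl (Or.inl (Or.inl hm))
    rw [hC]
    simp only [pvQ5, h1, Bool.not_true, Bool.false_and]
  · have e1 : pvQ1 k = false := by revert h1; cases pvQ1 k <;> simp
    by_cases h2 : (k == "C") = true
    · have hm : k ∈ keys.filter (fun k => k == "C") := List.mem_filter.mpr ⟨hk, h2⟩
      have hC : ((PySem.List.sorted (keys.filter pvQ1) (fun x => x) false
            ++ keys.filter (fun k => k == "C")
            ++ keys.filter (fun k => PySem.Str.startswith k "B")
            ++ keys.filter (fun k => k == "Va")).contains k) = true := by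
        rw [List.contains_eq_mem, decide_eq_true_eq]
        simp only [List.mem_append]
        exact Or.inl (Or.inl (Or.inr hm))
      rw [hC]
      simp only [pvQ5, h2, Bool.not_true, Bool.and_false, Bool.false_and]
    · have e2 : (k == "C") = false := by revert h2; cases h : (k == "C") <;> simp
      by_cases h3 : PySem.Str.startswith k "B" = true
      · have hm : k ∈ keys.filter (fun k => PySem.Str.startswith k "B") :=
          List.mem_filter.mpr ⟨hk, h3⟩
        have hC : ((PySem.List.sorted (keys.filter pvQ1) (fun x => x) false
              ++ keys.filter (fun k => k == "C")
              ++ keys.filter (fun k => PySem.Str.startswith k "B")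
              ++ keys.filter (fun k => k == "Va")).contains k) = true := by
          rw [List.contains_eq_mem, decide_eq_true_eq]
          simp only [List.mem_append]
          exact Or.inl (Or.inr hm)
        rw [hC]
        simp only [pvQ5, h3, Bool.not_true, Bool.and_false, Bool.false_and]
      · have e3 : PySem.Str.startswith k "B" = false := by
          revert h3; cases h : PySem.Str.startswith k "B" <;> simp
        by_cases h4 : (k == "Va") = true
        · have hm : k ∈ keys.filter (fun k => k == "Va") := List.mem_filter.mpr ⟨hk, h4⟩
          have hC : ((PySem.List.sorted (keys.filter pvQ1) (fun x => x) false
                ++ keys.filter (fun k => k == "C")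
                ++ keys.filter (fun k => PySem.Str.startswith k "B")
                ++ keys.filter (fun k => k == "Va")).contains k) = true := by
            rw [List.contains_eq_mem, decide_eq_true_eq]
            simp only [List.mem_append]
            exact Or.inr hm
          rw [hC]
          simp only [pvQ5, h4, Bool.not_true, Bool.and_false]
        · have e4 : (k == "Va") = false := by revert h4; cases h : (k == "Va") <;> simp
          have hC : ((PySem.List.sorted (keys.filter pvQ1) (fun x => x) false
                ++ keys.filter (fun k => k == "C")
                ++ keys.filter (fun k => PySem.Str.startswith k "B")
                ++ keys.filter (fun k => k == "Va")).contains k) = false := by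
            rw [List.contains_eq_mem, decide_eq_false_iff_not]
            intro hmem
            simp only [List.mem_append, PySem.List.mem_sorted, List.mem_filter] at hmem
            rcases hmem with ((⟨_, h⟩ | ⟨_, h⟩) | ⟨_, h⟩) | ⟨_, h⟩ <;> simp_all
          rw [hC]
          simp only [pvQ5, e1, e2, e3, e4, Bool.not_false, Bool.and_self]

-- each later category refutes the verse test
theorem pvQ3_not1 (k : String) (h : pvQ3 k = true) : pvQ1 k = false := by
  unfold pvQ3 at h; simp only [Bool.and_eq_true, Bool.not_eq_true'] at h; exact h.1.1

theorem pvQ4_not1 (k : String) (h : pvQ4 k = true) : pvQ1 k = false := by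
  unfold pvQ4 at h; simp only [Bool.and_eq_true, Bool.not_eq_true'] at h; exact h.1.1.1

theorem pvQ5_not1 (k : String) (h : pvQ5 k = true) : pvQ1 k = false := by
  unfold pvQ5 at h; simp only [Bool.and_eq_true, Bool.not_eq_true'] at h; exact h.1.1.1

-- ===== VERDICT (by name: the statement is the Claim_ definition above) =====
theorem create_interleaved_order_spec : Claim_equal_create_interleaved_order := by
  intro sections _
  show create_interleaved_order sections = create_interleaved_order_alt sections
  unfold create_interleaved_order create_interleaved_order_alt
  have hfun : (fun k => PySem.Str.startswith k "V" && k != "Va") = pvQ1 := rfl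
  rw [hfun]
  dsimp only []
  rw [pvOthers_eq, (funext pvQ3_eq).symm, (funext pvQ4_eq).symm]
  rw [pvDecomp, List.foldl_append]
  -- the suffix of B's single pass only appends: none of its elements is a verse
  have hsuf : ∀ acc : List String,
      List.foldl (fun order k =>
        if ((sections.map Prod.fst).contains "C" &&
            (PySem.Str.startswith k "V" && k != "Va")) = true
        then (order ++ [k]) ++ ["C"] else order ++ [k]) acc
        ((sections.map Prod.fst).filter pvQ3 ++
          ((sections.map Prod.fst).filter pvQ4 ++ (sections.map Prod.fst).filter pvQ5))
      = acc ++ ((sections.map Prod.fst).filter pvQ3 ++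
          ((sections.map Prod.fst).filter pvQ4 ++ (sections.map Prod.fst).filter pvQ5)) := by
    intro acc
    rw [PySem.List.foldl_congr_mem _ _ (fun order k => order ++ [k]) acc (by
      intro a k hkmem
      have hk1 : pvQ1 k = false := by
        rcases List.mem_append.mp hkmem with h3 | h45
        · exact pvQ3_not1 k (List.mem_filter.mp h3).2
        · rcases List.mem_append.mp h45 with h4 | h5
          · exact pvQ4_not1 k (List.mem_filter.mp h4).2
          · exact pvQ5_not1 k (List.mem_filter.mp h5).2
      have hk1' : (PySem.Str.startswith k "V" && k != "Va") = false := hk1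
      rw [hk1']
      simp)]
    exact PySem.List.foldl_append_singleton _ acc
  rw [hsuf]
  -- the verse prefix: A's interleave and B's conditional append coincide
  have hpre :
      List.foldl (fun order verse =>
        if ((sections.map Prod.fst).filter (fun k => k == "C")).isEmpty = true
        then order ++ [verse] else (order ++ [verse]) ++ ["C"]) []
        (PySem.List.sorted ((sections.map Prod.fst).filter pvQ1) (fun x => x) false)
      = List.foldl (fun order k =>
          if ((sections.map Prod.fst).contains "C" &&
              (PySem.Str.startswith k "V" && k != "Va")) = true
          then (order ++ [k]) ++ ["C"] else order ++ [k]) []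
          (PySem.List.sorted ((sections.map Prod.fst).filter pvQ1) (fun x => x) false) := by
    apply PySem.List.foldl_congr_mem
    intro acc v hv
    have hv1 : pvQ1 v = true :=
      (List.mem_filter.mp ((PySem.List.mem_sorted _ _ _ v).mp hv)).2
    have hv1' : (PySem.Str.startswith v "V" && v != "Va") = true := hv1
    rw [pvChorus, hv1']
    cases hc : (sections.map Prod.fst).contains "C" <;> simp
  rw [hpre]
  simp
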